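-- pv_equiv track=rewrite | github.com/kareemadesola/pythonDataStructures | LeetCode/daily/february_23.py | distinctNamesOptimized
-- ===== SOURCE A (Python) =====
-- from typing import List, Optional, Deque
--
-- def distinctNamesOptimized(ideas: List[str]) -> int:
--     initial_groups = [set() for _ in range(26)]
--     for idea in ideas:
--         initial_groups[ord(idea[0]) - ord('a')].add(idea[1:])
--
--     res = 0
--     for i in range(25):
--         for j in range(i + 1, 26):
--             num_of_mutual = len(initial_groups[i] & initial_groups[j])
--
--             res += 2 * (len(initial_groups[i]) - num_of_mutual) * len(initial_groups[j]) - num_of_mutual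
--     return res
-- ===== SOURCE B (Python) =====
-- def _pairs(srt):
--     if not srt:
--         return []
--     x, rest = srt[0], srt[1:]
--     return [(x, y) for y in rest] + _pairs(rest)
--
--
-- def distinctNamesOptimized(ideas):
--     letters_of = {}
--     for idea in ideas:
--         letters_of.setdefault(idea[1:], set()).add((ord(idea[0]) - ord('a')) % 26)
--     size = {}
--     mutual = {}
--     for ls in letters_of.values():
--         srt = sorted(ls)
--         for x in srt:
--             size[x] = size.get(x, 0) + 1
--         for p in _pairs(srt):
--             mutual[p] = mutual.get(p, 0) + 1
--     res = 0
--     for i in range(25):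
--         for j in range(i + 1, 26):
--             m = mutual.get((i, j), 0)
--             res += 2 * (size.get(i, 0) - m) * size.get(j, 0) - m
--     return res
-- ===== Notes on version B (the rewrite author's own statement) =====
-- stated objective: alternative
-- what changed: Instead of materialising 26 per-letter suffix sets and computing all 26x26 pairwise set intersections, B builds a dict mapping each distinct suffix to the set of first-letter groups it occurs under, then accumulates per-letter counts and a pair co-occurrence counter in one pass over the distinct suffixes, and reads those counters in the final i<j loop.
import Mathlib
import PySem

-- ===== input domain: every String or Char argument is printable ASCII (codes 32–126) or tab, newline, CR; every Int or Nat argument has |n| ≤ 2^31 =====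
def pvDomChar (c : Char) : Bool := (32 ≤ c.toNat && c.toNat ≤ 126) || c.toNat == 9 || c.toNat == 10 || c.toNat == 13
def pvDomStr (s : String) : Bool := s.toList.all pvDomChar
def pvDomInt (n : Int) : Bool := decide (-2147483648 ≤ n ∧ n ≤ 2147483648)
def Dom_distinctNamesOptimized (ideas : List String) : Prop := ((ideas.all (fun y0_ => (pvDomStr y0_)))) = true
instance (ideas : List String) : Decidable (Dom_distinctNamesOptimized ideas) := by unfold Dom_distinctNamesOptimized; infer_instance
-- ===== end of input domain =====

-- B replaces A's 26×26 explicit set intersections by one co-occurrence pass over the distinct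
-- suffixes (dict suffix → set of first-letter groups, then per-letter and per-pair counters);
-- objective: alternative decomposition, same return values.

-- ===== PORT A =====
def aStep (groups : List (PySem.Set String)) (idea : String) : List (PySem.Set String) :=
  let i : Int := ((PySem.List.pyGetD idea.toList 0 ' ').toNat : Int) - 97
  PySem.List.pySetD groups i
    (PySem.Set.add (PySem.List.pyGetD groups i PySem.Set.empty) (PySem.Str.slice idea (some 1) none))

def distinctNamesOptimized (ideas : List String) : Int :=
  let initial_groups := ideas.foldl aStep (List.replicate 26 PySem.Set.empty)
  (PySem.List.pyRange 0 25 1).foldl (fun res i =>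
    (PySem.List.pyRange (i + 1) 26 1).foldl (fun res j =>
      let gi := PySem.List.pyGetD initial_groups i PySem.Set.empty
      let gj := PySem.List.pyGetD initial_groups j PySem.Set.empty
      let numOfMutual : Int := (PySem.Set.inter gi gj).length
      res + (2 * ((gi.length : Int) - numOfMutual) * (gj.length : Int) - numOfMutual)) res) 0

-- ===== PORT B =====
def bPairs : List Int → List (Int × Int)
  | [] => []
  | x :: rest => rest.map (fun y => (x, y)) ++ bPairs rest

def bKey (idea : String) : Int :=
  PySem.Int.mod (((PySem.List.pyGetD idea.toList 0 ' ').toNat : Int) - 97) 26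

def bSuf (idea : String) : String := PySem.Str.slice idea (some 1) none

def bLetters (ideas : List String) : PySem.Dict String (PySem.Set Int) :=
  ideas.foldl (fun d idea => d.modify (bSuf idea) PySem.Set.empty (fun s => PySem.Set.add s (bKey idea)))
    PySem.Dict.empty

def bCStep (st : PySem.Dict Int Int × PySem.Dict (Int × Int) Int) (ls : PySem.Set Int) :
    PySem.Dict Int Int × PySem.Dict (Int × Int) Int :=
  let srt := PySem.List.sorted ls (fun x => x) false
  ((srt.foldl (fun sz x => sz.modify x 0 (· + 1)) st.1),
   ((bPairs srt).foldl (fun mu p => mu.modify p 0 (· + 1)) st.2))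

def bCounts (vals : List (PySem.Set Int)) : PySem.Dict Int Int × PySem.Dict (Int × Int) Int :=
  vals.foldl bCStep (PySem.Dict.empty, PySem.Dict.empty)

def distinctNamesOptimized_alt (ideas : List String) : Int :=
  let st := bCounts (bLetters ideas).values
  (PySem.List.pyRange 0 25 1).foldl (fun res i =>
    (PySem.List.pyRange (i + 1) 26 1).foldl (fun res j =>
      let m := st.2.getD (i, j) 0
      res + (2 * (st.1.getD i 0 - m) * st.1.getD j 0 - m)) res) 0

-- ===== PRECONDITION & SPEC =====
-- Pre_ is exactly where the Python A returns: every idea is nonempty and its first character has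
-- code in [71, 122] ('G'..'z'); outside that, idea[0] or the negative/overflowing list index
-- raises IndexError.
def Pre_distinctNamesOptimized (ideas : List String) : Prop :=
  ∀ idea ∈ ideas, idea.toList ≠ [] ∧ 71 ≤ idea.toList.headI.toNat ∧ idea.toList.headI.toNat ≤ 122
instance (ideas : List String) : Decidable (Pre_distinctNamesOptimized ideas) := by
  unfold Pre_distinctNamesOptimized; infer_instance

def pvWitness_distinctNamesOptimized : List String := ["coffee", "donuts", "time", "toffee"]

def Spec_distinctNamesOptimized (ideas : List String) (out : Int) : Prop := out = distinctNamesOptimized_alt ideas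
instance (ideas : List String) (out : Int) : Decidable (Spec_distinctNamesOptimized ideas out) := by unfold Spec_distinctNamesOptimized; infer_instance

-- ===== CLAIM (what is proved, stated in full; the proofs are below) =====
def Claim_equal_distinctNamesOptimized : Prop := ∀ (ideas : List String), Dom_distinctNamesOptimized ideas → Pre_distinctNamesOptimized ideas → Spec_distinctNamesOptimized ideas (distinctNamesOptimized ideas)

-- ===== LEMMAS AND PROOFS =====

-- abstractions both sides are reduced to: per-suffix letter sets and per-letter suffix sets
def lettersOf (l : List String) (s : String) : PySem.Set Int :=
  PySem.Set.ofList ((l.filter (fun t => bSuf t = s)).map bKey)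

def groupOf (l : List String) (i : Int) : PySem.Set String :=
  PySem.Set.ofList ((l.filter (fun t => bKey t = i)).map bSuf)

def keysetOf (l : List String) : PySem.Set String := PySem.Set.ofList (l.map bSuf)

def cnt1 (l : List String) (i : Int) : Nat :=
  List.countP (fun s => decide (i ∈ lettersOf l s)) (keysetOf l)

def cnt2 (l : List String) (i j : Int) : Nat :=
  List.countP (fun s => decide (i ∈ lettersOf l s ∧ j ∈ lettersOf l s)) (keysetOf l)

-- index normalisation on the A side (Python's negative list index wraps)
lemma pyGetD_mod26 {α : Type} (xs : List α) (h : xs.length = 26) (i : Int)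
    (h1 : -26 ≤ i) (h2 : i < 26) (d : α) :
    PySem.List.pyGetD xs i d = xs.getD (PySem.Int.mod i 26).toNat d := by
  have hm : PySem.Int.mod i 26 = if 0 ≤ i then i else i + 26 := by
    rw [PySem.Int.mod_eq_emod_of_pos (by norm_num)]
    split <;> omega
  simp only [PySem.List.pyGetD, PySem.List.pyGet?, PySem.List.pyIdx?, h, hm,
    List.getD_eq_getElem?_getD]
  rcases le_or_gt 0 i with hpos | hneg
  · rw [if_pos hpos, if_pos (by exact_mod_cast h2), if_pos hpos]
    simp
  · rw [if_neg (by omega), if_pos (by exact_mod_cast h1), if_neg (by omega)]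
    have : 26 - (-i).toNat = (i + 26).toNat := by omega
    simp [this]

lemma pySetD_mod26 {α : Type} (xs : List α) (h : xs.length = 26) (i : Int)
    (h1 : -26 ≤ i) (h2 : i < 26) (v : α) :
    PySem.List.pySetD xs i v = xs.set (PySem.Int.mod i 26).toNat v := by
  have hm : PySem.Int.mod i 26 = if 0 ≤ i then i else i + 26 := by
    rw [PySem.Int.mod_eq_emod_of_pos (by norm_num)]
    split <;> omega
  simp only [PySem.List.pySetD, PySem.List.pySet?, PySem.List.pyIdx?, h, hm]
  rcases le_or_gt 0 i with hpos | hneg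
  · rw [if_pos hpos, if_pos (by exact_mod_cast h2), if_pos hpos]
    simp
  · rw [if_neg (by omega), if_pos (by exact_mod_cast h1), if_neg (by omega)]
    have : 26 - (-i).toNat = (i + 26).toNat := by omega
    simp [this]

lemma bKey_bounds (s : String) : 0 ≤ bKey s ∧ bKey s < 26 :=
  ⟨PySem.Int.mod_nonneg _ (by norm_num), PySem.Int.mod_lt _ (by norm_num)⟩

-- A's fold invariant
lemma getD_set_26 {α : Type} (xs : List α) (h : xs.length = 26) (p n : Nat) (hp : p < 26)
    (hn : n < 26) (v d : α) :
    (xs.set p v).getD n d = if n = p then v else xs.getD n d := by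
  by_cases hnp : n = p
  · subst hnp
    simp [List.getD_eq_getElem?_getD, h, hn]
  · simp [List.getD_eq_getElem?_getD, List.getElem?_set_ne (fun hh => hnp hh.symm), hnp]

lemma aStep_eq (groups : List (PySem.Set String)) (h : groups.length = 26) (t : String)
    (ht : t.toList ≠ [] ∧ 71 ≤ t.toList.headI.toNat ∧ t.toList.headI.toNat ≤ 122) :
    aStep groups t =
      groups.set (bKey t).toNat
        (PySem.Set.add (groups.getD (bKey t).toNat PySem.Set.empty) (bSuf t)) := by
  obtain ⟨c, cs, hc⟩ := List.exists_cons_of_ne_nil ht.1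
  have hhead : t.toList.headI = c := by rw [hc]; rfl
  have hget : PySem.List.pyGetD t.toList 0 ' ' = c := by
    rw [hc]
    norm_num [PySem.List.pyGetD, PySem.List.pyGet?, PySem.List.pyIdx?]
  have hb : (71 : Nat) ≤ c.toNat ∧ c.toNat ≤ 122 := by
    rw [← hhead]; exact ⟨ht.2.1, ht.2.2⟩
  unfold aStep bKey bSuf
  rw [hget]
  have h1 : -26 ≤ (c.toNat : Int) - 97 := by omega
  have h2 : (c.toNat : Int) - 97 < 26 := by omega
  rw [pySetD_mod26 groups h _ h1 h2, pyGetD_mod26 groups h _ h1 h2]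

lemma aFold_getD (l : List String)
    (hpre : ∀ idea ∈ l, idea.toList ≠ [] ∧ 71 ≤ idea.toList.headI.toNat ∧ idea.toList.headI.toNat ≤ 122)
    (groups : List (PySem.Set String)) (h : groups.length = 26) (n : Nat) (hn : n < 26) :
    (l.foldl aStep groups).getD n PySem.Set.empty =
      PySem.Set.update (groups.getD n PySem.Set.empty)
        ((l.filter (fun t => bKey t = (n : Int))).map bSuf) := by
  induction l generalizing groups with
  | nil => simp [PySem.Set.update_nil]
  | cons t rest ih =>
    have ht := hpre t List.mem_cons_self
    have hrest : ∀ idea ∈ rest, _ := fun idea hi => hpre idea (List.mem_cons_of_mem _ hi)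
    rw [List.foldl_cons, aStep_eq groups h t ht,
      ih hrest _ (by simp [h])]
    have hkb := bKey_bounds t
    have hkt : (bKey t).toNat < 26 := by omega
    rw [getD_set_26 groups h _ n hkt hn]
    by_cases hk : bKey t = (n : Int)
    · have : n = (bKey t).toNat := by omega
      rw [if_pos this, List.filter_cons_of_pos (by simpa using hk), List.map_cons,
        PySem.Set.update_cons, this]
    · have : ¬ (n = (bKey t).toNat) := by omega
      rw [if_neg this, List.filter_cons_of_neg (by simpa using hk)]

lemma aGroups_read (l : List String)
    (hpre : ∀ idea ∈ l, idea.toList ≠ [] ∧ 71 ≤ idea.toList.headI.toNat ∧ idea.toList.headI.toNat ≤ 122)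
    (i : Int) (h0 : 0 ≤ i) (h26 : i < 26) :
    PySem.List.pyGetD (l.foldl aStep (List.replicate 26 PySem.Set.empty)) i PySem.Set.empty
      = groupOf l i := by
  unfold groupOf
  have hi : i = ((i.toNat : Nat) : Int) := by omega
  rw [hi, PySem.List.pyGetD_natCast,
    aFold_getD l hpre _ (by simp) i.toNat (by omega)]
  have hlt : i.toNat < 26 := by omega
  rw [List.getD_eq_getElem?_getD, List.getElem?_replicate, if_pos hlt, Option.getD_some]
  exact PySem.Set.update_nil_left _

-- membership characterisations
lemma mem_groupOf (l : List String) (i : Int) (s : String) :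
    s ∈ groupOf l i ↔ ∃ t ∈ l, bKey t = i ∧ bSuf t = s := by
  unfold groupOf
  rw [PySem.Set.mem_ofList]
  simp only [List.mem_map, List.mem_filter, decide_eq_true_eq]
  constructor
  · rintro ⟨t, ⟨htl, hk⟩, hsuf⟩; exact ⟨t, htl, hk, hsuf⟩
  · rintro ⟨t, htl, hk, hsuf⟩; exact ⟨t, ⟨htl, hk⟩, hsuf⟩

lemma mem_lettersOf (l : List String) (s : String) (i : Int) :
    i ∈ lettersOf l s ↔ ∃ t ∈ l, bSuf t = s ∧ bKey t = i := by
  unfold lettersOf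
  rw [PySem.Set.mem_ofList]
  simp only [List.mem_map, List.mem_filter, decide_eq_true_eq]
  constructor
  · rintro ⟨t, ⟨htl, hsuf⟩, hk⟩; exact ⟨t, htl, hsuf, hk⟩
  · rintro ⟨t, htl, hsuf, hk⟩; exact ⟨t, ⟨htl, hsuf⟩, hk⟩

lemma mem_keysetOf (l : List String) (s : String) :
    s ∈ keysetOf l ↔ ∃ t ∈ l, bSuf t = s := by
  unfold keysetOf
  rw [PySem.Set.mem_ofList]
  simp [List.mem_map]

-- counting the A side
lemma groupOf_length (l : List String) (i : Int) : (groupOf l i).length = cnt1 l i := by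
  unfold cnt1
  rw [List.countP_eq_length_filter]
  have h1 : (groupOf l i).Nodup := PySem.Set.nodup_ofList _
  have h2 : (List.filter (fun s => decide (i ∈ lettersOf l s)) (keysetOf l)).Nodup :=
    List.Nodup.filter _ (PySem.Set.nodup_ofList _)
  refine List.Perm.length_eq ((List.perm_ext_iff_of_nodup h1 h2).mpr ?_)
  intro s
  rw [List.mem_filter, mem_groupOf, mem_keysetOf, decide_eq_true_eq, mem_lettersOf]
  constructor
  · rintro ⟨t, htl, hk, hsuf⟩
    exact ⟨⟨t, htl, hsuf⟩, ⟨t, htl, hsuf, hk⟩⟩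
  · rintro ⟨-, t, htl, hsuf, hk⟩
    exact ⟨t, htl, hk, hsuf⟩

lemma inter_length (l : List String) (i j : Int) :
    (PySem.Set.inter (groupOf l i) (groupOf l j)).length = cnt2 l i j := by
  unfold cnt2
  rw [List.countP_eq_length_filter]
  have h1 : (PySem.Set.inter (groupOf l i) (groupOf l j)).Nodup :=
    PySem.Set.nodup_inter _ _ (PySem.Set.nodup_ofList _)
  have h2 : (List.filter (fun s => decide (i ∈ lettersOf l s ∧ j ∈ lettersOf l s)) (keysetOf l)).Nodup :=
    List.Nodup.filter _ (PySem.Set.nodup_ofList _)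
  refine List.Perm.length_eq ((List.perm_ext_iff_of_nodup h1 h2).mpr ?_)
  intro s
  rw [PySem.Set.mem_inter, List.mem_filter, mem_groupOf, mem_groupOf, mem_keysetOf,
    decide_eq_true_eq, mem_lettersOf, mem_lettersOf]
  constructor
  · rintro ⟨⟨t, htl, hk, hsuf⟩, ⟨u, hul, hku, hsufu⟩⟩
    exact ⟨⟨t, htl, hsuf⟩, ⟨t, htl, hsuf, hk⟩, ⟨u, hul, hsufu, hku⟩⟩
  · rintro ⟨-, ⟨t, htl, hsuf, hk⟩, ⟨u, hul, hsufu, hku⟩⟩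
    exact ⟨⟨t, htl, hk, hsuf⟩, ⟨u, hul, hku, hsufu⟩⟩

-- B's dict invariant
lemma bLetters_keys (l : List String) : (bLetters l).keys = keysetOf l := by
  unfold bLetters keysetOf
  rw [PySem.Dict.keys_foldl_modify_key l bSuf PySem.Set.empty
    (fun _ idea => fun s => PySem.Set.add s (bKey idea)) PySem.Dict.empty]
  rw [PySem.Dict.keys_empty]
  exact PySem.Set.update_nil_left _

lemma bLetters_keys_nodup (l : List String) : (bLetters l).keys.Nodup := by
  rw [bLetters_keys]
  exact PySem.Set.nodup_ofList _

lemma bFold_getD (l : List String) (d : PySem.Dict String (PySem.Set Int)) (s : String) :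
    (l.foldl (fun d idea => d.modify (bSuf idea) PySem.Set.empty (fun st => PySem.Set.add st (bKey idea))) d).getD s PySem.Set.empty =
      PySem.Set.update (d.getD s PySem.Set.empty) ((l.filter (fun t => bSuf t = s)).map bKey) := by
  induction l generalizing d with
  | nil => simp [PySem.Set.update_nil]
  | cons t rest ih =>
    rw [List.foldl_cons, ih]
    rw [PySem.Dict.getD_modify]
    by_cases hs : s = bSuf t
    · rw [if_pos hs, List.filter_cons_of_pos (by simpa using hs.symm), List.map_cons,
        PySem.Set.update_cons, hs]
    · rw [if_neg hs, List.filter_cons_of_neg (by simpa using fun h => hs h.symm)]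

lemma bLetters_getD (l : List String) (s : String) :
    (bLetters l).getD s PySem.Set.empty = lettersOf l s := by
  unfold bLetters lettersOf
  rw [bFold_getD, PySem.Dict.getD_empty]
  exact PySem.Set.update_nil_left _

lemma bLetters_values (l : List String) :
    (bLetters l).values = (keysetOf l).map (lettersOf l) := by
  rw [PySem.Dict.values_eq_map_keys _ (bLetters_keys_nodup l) PySem.Set.empty, bLetters_keys]
  exact List.map_congr_left (fun s _ => bLetters_getD l s)

-- B's counting folds
lemma bCounts_fst (vals : List (PySem.Set Int))
    (st : PySem.Dict Int Int × PySem.Dict (Int × Int) Int) (i : Int) :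
    (vals.foldl bCStep st).1.getD i 0 =
      st.1.getD i 0 + (vals.map (fun ls => ((PySem.List.sorted ls (fun x => x) false).count i : Int))).sum := by
  induction vals generalizing st with
  | nil => simp
  | cons ls rest ih =>
    rw [List.foldl_cons, ih]
    show (bCStep st ls).1.getD i 0 + _ = _
    rw [bCStep]
    simp only [PySem.Dict.getD_foldl_modify_add_one, List.map_cons, List.sum_cons]
    ring

lemma bCounts_snd (vals : List (PySem.Set Int))
    (st : PySem.Dict Int Int × PySem.Dict (Int × Int) Int) (p : Int × Int) :
    (vals.foldl bCStep st).2.getD p 0 =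
      st.2.getD p 0 + (vals.map (fun ls => ((bPairs (PySem.List.sorted ls (fun x => x) false)).count p : Int))).sum := by
  induction vals generalizing st with
  | nil => simp
  | cons ls rest ih =>
    rw [List.foldl_cons, ih]
    show (bCStep st ls).2.getD p 0 + _ = _
    rw [bCStep]
    simp only [PySem.Dict.getD_foldl_modify_add_one, List.map_cons, List.sum_cons]
    ring

lemma sorted_count_nodup (ls : List Int) (h : ls.Nodup) (i : Int) :
    (PySem.List.sorted ls (fun x => x) false).count i = if i ∈ ls then 1 else 0 := by
  rw [(PySem.List.sorted_perm ls (fun x => x) false).count_eq]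
  split
  · exact List.count_eq_one_of_mem h ‹_›
  · exact List.count_eq_zero_of_not_mem ‹_›

lemma bPairs_mem (srt : List Int) (p : Int × Int) (h : p ∈ bPairs srt) : p.1 ∈ srt ∧ p.2 ∈ srt := by
  induction srt with
  | nil => simp [bPairs] at h
  | cons x rest ih =>
    simp only [bPairs, List.mem_append, List.mem_map] at h
    rcases h with ⟨y, hy, rfl⟩ | h
    · exact ⟨List.mem_cons_self, List.mem_cons_of_mem _ hy⟩
    · exact ⟨List.mem_cons_of_mem _ (ih h).1, List.mem_cons_of_mem _ (ih h).2⟩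

lemma bPairs_count (i j : Int) (hij : i < j) (srt : List Int) (h : srt.Pairwise (· < ·)) :
    (bPairs srt).count (i, j) = if i ∈ srt ∧ j ∈ srt then 1 else 0 := by
  induction srt with
  | nil => simp [bPairs]
  | cons x rest ih =>
    rw [List.pairwise_cons] at h
    have hrest := ih h.2
    have hnd : rest.Nodup := List.Pairwise.imp ne_of_lt h.2
    rw [show bPairs (x :: rest) = rest.map (fun y => (x, y)) ++ bPairs rest from rfl,
      List.count_append]
    by_cases hx : x = i
    · subst hx
      have hmap : (rest.map (fun y => (x, y))).count (x, j) = rest.count j :=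
        List.count_map_of_injective rest (fun y => (x, y)) (fun a b hab => by simpa using hab) j
      have hnotin : x ∉ rest := fun hmem => absurd (h.1 x hmem) (lt_irrefl x)
      have hzero : (bPairs rest).count (x, j) = 0 := by
        rw [List.count_eq_zero]
        intro hmem
        exact hnotin (bPairs_mem rest (x, j) hmem).1
      rw [hmap, hzero]
      by_cases hjr : j ∈ rest
      · rw [List.count_eq_one_of_mem hnd hjr, if_pos ⟨List.mem_cons_self, List.mem_cons_of_mem _ hjr⟩]
      · rw [List.count_eq_zero_of_not_mem hjr, if_neg]
        rintro ⟨-, hj⟩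
        rcases List.mem_cons.mp hj with rfl | hj
        · exact absurd hij (lt_irrefl _)
        · exact hjr hj
    · have hmap : (rest.map (fun y => (x, y))).count (i, j) = 0 := by
        rw [List.count_eq_zero]
        intro hmem
        obtain ⟨y, -, hy⟩ := List.mem_map.mp hmem
        exact hx (congrArg Prod.fst hy)
      rw [hmap, hrest, Nat.zero_add]
      by_cases hir : i ∈ rest
      · have hjx : j ≠ x := fun hjx => absurd (h.1 i hir) (by omega)
        simp [hir, List.mem_cons, hjx]
      · have : ¬ (i ∈ x :: rest ∧ j ∈ x :: rest) := by
          rintro ⟨hi, -⟩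
          rcases List.mem_cons.mp hi with rfl | hi
          · exact hx rfl
          · exact hir hi
        rw [if_neg (fun hc : i ∈ rest ∧ j ∈ rest => hir hc.1), if_neg this]

lemma bSize_eq (l : List String) (i : Int) :
    (bCounts (bLetters l).values).1.getD i 0 = (cnt1 l i : Int) := by
  unfold bCounts
  rw [bCounts_fst, PySem.Dict.getD_empty, bLetters_values, List.map_map]
  have hmap : ∀ s ∈ keysetOf l,
      (((PySem.List.sorted (lettersOf l s) (fun x => x) false).count i : Int)) =
        if (fun s => decide (i ∈ lettersOf l s)) s = true then (1 : Int) else 0 := by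
    intro s _
    have hnd : (lettersOf l s).Nodup := PySem.Set.nodup_ofList _
    rw [sorted_count_nodup (lettersOf l s) hnd i]
    by_cases h : i ∈ lettersOf l s <;> simp [h]
  rw [show ((fun ls => ((PySem.List.sorted ls (fun x => x) false).count i : Int)) ∘ lettersOf l)
      = fun s => ((PySem.List.sorted (lettersOf l s) (fun x => x) false).count i : Int) from rfl]
  rw [List.map_congr_left hmap, PySem.List.sum_map_ite_one_zero]
  unfold cnt1
  ring

lemma bMutual_eq (l : List String) (i j : Int) (hij : i < j) :
    (bCounts (bLetters l).values).2.getD (i, j) 0 = (cnt2 l i j : Int) := by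
  unfold bCounts
  rw [bCounts_snd, PySem.Dict.getD_empty, bLetters_values, List.map_map]
  have hmap : ∀ s ∈ keysetOf l,
      (((bPairs (PySem.List.sorted (lettersOf l s) (fun x => x) false)).count (i, j) : Int)) =
        if (fun s => decide (i ∈ lettersOf l s ∧ j ∈ lettersOf l s)) s = true then (1 : Int) else 0 := by
    intro s _
    have hnd : (lettersOf l s).Nodup := PySem.Set.nodup_ofList _
    have hsortnd : (PySem.List.sorted (lettersOf l s) (fun x => x) false).Nodup :=
      ((PySem.List.sorted_perm (lettersOf l s) (fun x => x) false).nodup_iff).mpr hnd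
    have hle := PySem.List.sorted_pairwise (lettersOf l s) (fun x => x)
    have hlt : (PySem.List.sorted (lettersOf l s) (fun x => x) false).Pairwise (· < ·) :=
      (hle.and hsortnd).imp (fun hab => lt_of_le_of_ne hab.1 hab.2)
    rw [bPairs_count i j hij _ hlt]
    have hm1 : i ∈ PySem.List.sorted (lettersOf l s) (fun x => x) false ↔ i ∈ lettersOf l s :=
      (PySem.List.sorted_perm _ _ _).mem_iff
    have hm2 : j ∈ PySem.List.sorted (lettersOf l s) (fun x => x) false ↔ j ∈ lettersOf l s :=
      (PySem.List.sorted_perm _ _ _).mem_iff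
    by_cases h1 : i ∈ lettersOf l s <;> by_cases h2 : j ∈ lettersOf l s <;>
      simp [hm1, hm2, h1, h2]
  rw [show ((fun ls => ((bPairs (PySem.List.sorted ls (fun x => x) false)).count (i, j) : Int)) ∘ lettersOf l)
      = fun s => ((bPairs (PySem.List.sorted (lettersOf l s) (fun x => x) false)).count (i, j) : Int) from rfl]
  rw [List.map_congr_left hmap, PySem.List.sum_map_ite_one_zero]
  unfold cnt2
  ring

-- ===== VERDICT (by name: the statement is the Claim_ definition above) =====
theorem distinctNamesOptimized_spec : Claim_equal_distinctNamesOptimized := by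
  intro ideas _ hpre
  unfold Spec_distinctNamesOptimized distinctNamesOptimized distinctNamesOptimized_alt
  apply PySem.List.foldl_congr_mem
  intro acc i hi
  apply PySem.List.foldl_congr_mem
  intro acc2 j hj
  rw [PySem.List.mem_pyRange_one] at hi hj
  simp only [aGroups_read ideas hpre i (by omega) (by omega),
      aGroups_read ideas hpre j (by omega) (by omega),
      groupOf_length, inter_length,
      bSize_eq, bMutual_eq ideas i j (by omega)]
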